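-- pv_equiv track=rewrite | github.com/Grand-Y/cpss-utils | net_security/rsa.py | change_text2num
-- ===== SOURCE A (Python) =====
-- UP_ASCII_DIFF = 19      # 大写字符在ASCII和设定数字的差，以A为例，65 - 46 = 19
--
-- LOW_ASCII_DIFF = 77     # 小写字符在ASCII和设定数字的差，以a为例，97 - 20 = 77
--
-- NUM_ASCII_DIFF = 38     # 数字在ASCII和设定数字的差，以0为例，48 - 10 = 38
--
-- def change_text2num(text):    # 将明文变成整数数组
--     res = []
--     str_num = 0
--     for i in range(0, len(text)):
--         num = 0
--         if 48 <= ord(text[i]) <= 57: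
--             num = ord(text[i]) - NUM_ASCII_DIFF
--         elif 65 <= ord(text[i]) <= 90:
--             num = ord(text[i]) - UP_ASCII_DIFF
--         elif 97 <= ord(text[i]) <= 122:
--             num = ord(text[i]) - LOW_ASCII_DIFF
--
--         if (i % 2 != 0):            # 将单数位字符的变成四位整数的前两位，双数位变成后两位
--             str_num += num
--             res.append(str_num)
--         else:
--             str_num = num * 100
--             if i == len(text) - 1:
--                 res.append(str_num)
--     return res
-- ===== SOURCE B (Python) =====
-- def _enc(c):
--     if c.isdigit():
--         return ord(c) - 38
--     if 'A' <= c <= 'Z':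
--         return ord(c) - 19
--     if 'a' <= c <= 'z':
--         return ord(c) - 77
--     return 0
--
-- def change_text2num(text):
--     res = []
--     for i in range(0, len(text), 2):
--         val = _enc(text[i]) * 100
--         if i + 1 < len(text):
--             val += _enc(text[i + 1])
--         res.append(val)
--     return res
-- ===== Notes on version B (the rewrite author's own statement) =====
-- stated objective: simpler
-- what changed: B maps each char with a small helper and walks the string two characters per step, emitting one paired number per iteration, instead of A's per-char loop with a parity flag, a running accumulator and a trailing-last-char special case.
import Mathlib
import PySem

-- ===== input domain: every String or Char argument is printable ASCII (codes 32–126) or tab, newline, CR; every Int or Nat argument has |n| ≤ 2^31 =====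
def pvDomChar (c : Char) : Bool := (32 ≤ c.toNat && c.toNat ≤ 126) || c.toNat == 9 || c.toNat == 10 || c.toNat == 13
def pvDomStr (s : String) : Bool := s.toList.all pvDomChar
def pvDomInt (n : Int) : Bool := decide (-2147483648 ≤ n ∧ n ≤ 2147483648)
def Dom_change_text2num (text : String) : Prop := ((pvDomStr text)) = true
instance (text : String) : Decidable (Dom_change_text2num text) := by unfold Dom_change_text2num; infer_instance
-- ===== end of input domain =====

-- B rewrites A's per-char loop (parity flag + running accumulator + trailing special case)
-- as a char-encoding helper plus a two-chars-per-step walk; objective: simpler.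

-- ===== PORT A =====
-- loop body of A's for-loop, with L = len(text); state = (res, str_num)
def stepA (L : Int) (st : List Int × Int) (p : Int × Char) : List Int × Int :=
  let num : Int :=
    if 48 ≤ (p.2.toNat : Int) ∧ (p.2.toNat : Int) ≤ 57 then (p.2.toNat : Int) - 38
    else if 65 ≤ (p.2.toNat : Int) ∧ (p.2.toNat : Int) ≤ 90 then (p.2.toNat : Int) - 19
    else if 97 ≤ (p.2.toNat : Int) ∧ (p.2.toNat : Int) ≤ 122 then (p.2.toNat : Int) - 77
    else 0
  if p.1 % 2 ≠ 0 then (st.1 ++ [st.2 + num], st.2 + num)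
  else
    let str_num := num * 100
    if p.1 = L - 1 then (st.1 ++ [str_num], str_num) else (st.1, str_num)

def change_text2num (text : String) : List Int :=
  ((PySem.List.enumerate text.toList 0).foldl
    (stepA (text.toList.length : Int)) ([], 0)).1

-- ===== PORT B =====
def encB (c : Char) : Int :=
  if 48 ≤ (c.toNat : Int) ∧ (c.toNat : Int) ≤ 57 then (c.toNat : Int) - 38
  else if 65 ≤ (c.toNat : Int) ∧ (c.toNat : Int) ≤ 90 then (c.toNat : Int) - 19
  else if 97 ≤ (c.toNat : Int) ∧ (c.toNat : Int) ≤ 122 then (c.toNat : Int) - 77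
  else 0

def altGo : List Char → List Int
  | [] => []
  | [c] => [encB c * 100]
  | c :: d :: rest => (encB c * 100 + encB d) :: altGo rest

def change_text2num_alt (text : String) : List Int := altGo text.toList

-- ===== PRECONDITION & SPEC =====
def Spec_change_text2num (text : String) (out : List Int) : Prop := out = change_text2num_alt text
instance (text : String) (out : List Int) : Decidable (Spec_change_text2num text out) := by unfold Spec_change_text2num; infer_instance

-- ===== CLAIM (what is proved, stated in full; the proofs are below) =====
def Claim_equal_change_text2num : Prop := ∀ (text : String), Dom_change_text2num text → Spec_change_text2num text (change_text2num text)

-- ===== LEMMAS AND PROOFS =====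
theorem stepA_odd (L i : Int) (c : Char) (st : List Int × Int) (h : i % 2 ≠ 0) :
    stepA L st (i, c) = (st.1 ++ [st.2 + encB c], st.2 + encB c) := by
  simp only [stepA]
  rw [if_pos h]
  rfl

theorem stepA_even_last (L i : Int) (c : Char) (st : List Int × Int)
    (h2 : i % 2 = 0) (h : i = L - 1) :
    stepA L st (i, c) = (st.1 ++ [encB c * 100], encB c * 100) := by
  simp only [stepA]
  rw [if_neg (show ¬ i % 2 ≠ 0 by omega), if_pos h]
  rfl

theorem stepA_even_mid (L i : Int) (c : Char) (st : List Int × Int)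
    (h2 : i % 2 = 0) (h : i ≠ L - 1) :
    stepA L st (i, c) = (st.1, encB c * 100) := by
  simp only [stepA]
  rw [if_neg (show ¬ i % 2 ≠ 0 by omega), if_neg h]
  rfl

theorem go (cs : List Char) (k : Nat) (res : List Int) (s : Int) :
    ((PySem.List.enumerate cs (2 * (k : Int))).foldl
        (stepA (2 * (k : Int) + (cs.length : Int))) (res, s)).1
      = res ++ altGo cs := by
  match cs with
  | [] => simp [PySem.List.enumerate_nil, altGo]
  | [c] =>
      simp only [PySem.List.enumerate_cons, PySem.List.enumerate_nil, List.foldl,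
        altGo, List.length_cons, List.length_nil]
      rw [stepA_even_last _ (2 * (k : Int)) c (res, s) (by omega) (by push_cast; omega)]
  | c :: d :: rest =>
      simp only [PySem.List.enumerate_cons, List.foldl, List.length_cons]
      rw [stepA_even_mid _ (2 * (k : Int)) c (res, s) (by omega) (by push_cast; omega)]
      rw [stepA_odd _ (2 * (k : Int) + 1) d ((res, s).1, encB c * 100) (by omega)]
      have hst : (2 * (k : Int) + 1 + 1) = 2 * ((k + 1 : Nat) : Int) := by push_cast; ring
      have hL : (2 * (k : Int) + ((rest.length + 1 + 1 : Nat) : Int))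
          = 2 * ((k + 1 : Nat) : Int) + (rest.length : Int) := by push_cast; ring
      rw [hst, hL]
      simpa [altGo] using
        go rest (k + 1) (res ++ [encB c * 100 + encB d]) (encB c * 100 + encB d)

theorem change_text2num_spec : Claim_equal_change_text2num := by
  intro text _
  unfold Spec_change_text2num change_text2num change_text2num_alt
  have := go text.toList 0 [] 0
  simpa using this
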